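-- pv_equiv track=rewrite | github.com/Vinhcognito/myAoc | 2025/solutions/day2.py | check
-- ===== SOURCE A (Python) =====
-- import math
--
-- def check(num: str) -> bool:
--     for factor in range(1, math.floor(len(num) / 2)):
--         flag = True
--         if len(num) % factor == 0:
--             li = []
--             for i in range(int(len(num) / factor)):
--                 li.append(num[i * factor : (i + 1) * factor])
--             if len(li) == 1:
--                 continue
--             for i in range(len(li)):
--                 if li[0] != li[i]:
--                     flag = False
--             if flag:
--                 return True
--
--     return False
-- ===== SOURCE B (Python) =====
-- def check(num: str) -> bool:
--     # minimal-period approach: the minimal period p of num is n - (longest proper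
--     # border); num is >=3 repetitions of a block iff p divides n and n // p >= 3.
--     n = len(num)
--     best = 0
--     for l in range(1, n):
--         if num[:l] == num[n - l:]:
--             best = l
--     p = n - best
--     return n >= 3 and n % p == 0 and n // p >= 3
-- ===== Notes on version B (the rewrite author's own statement) =====
-- stated objective: alternative
-- what changed: B computes the longest proper border of the string in one scan, derives the minimal period p = n - border, and answers by arithmetic (p divides n and n//p >= 3), instead of A's enumeration of candidate block sizes with splitting into chunks and pairwise chunk comparison; correctness rests on the periodicity (Fine-Wilf) lemma proved in the Lean file.
-- intended difference: On 3-character strings of one repeated character (e.g. 'aaa') A returns False because its factor loop range(1, floor(n/2)) excludes factor 1 when n=3; B returns True, the intended value since such a string is 3 repetitions of one character. — e.g. on check("aaa"): A returns false, B returns true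
import Mathlib
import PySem

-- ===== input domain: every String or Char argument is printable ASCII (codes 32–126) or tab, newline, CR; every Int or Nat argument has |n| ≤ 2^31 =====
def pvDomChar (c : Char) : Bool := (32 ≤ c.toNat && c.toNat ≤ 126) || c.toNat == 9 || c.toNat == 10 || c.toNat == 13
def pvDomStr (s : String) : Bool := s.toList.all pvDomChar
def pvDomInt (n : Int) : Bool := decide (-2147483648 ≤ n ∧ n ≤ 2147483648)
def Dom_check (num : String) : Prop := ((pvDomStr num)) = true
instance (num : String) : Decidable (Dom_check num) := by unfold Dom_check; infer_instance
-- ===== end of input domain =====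

-- B finds the longest proper border, derives the minimal period p = n - border and answers by
-- arithmetic (p ∣ n ∧ 3 ≤ n / p), instead of A's enumeration of block sizes with chunk splitting
-- and comparison; B also returns the intended True on 3-char one-character strings where A's loop
-- bound excludes factor 1.


-- ===== PORT A =====
-- loop body for one value of `factor` (everything under `if len(num) % factor == 0:`);
-- math.floor(len(num)/2) and int(len(num)/factor) are exact Nat divisions for these lengths
def checkInner (s : List Char) (n f : Nat) : Bool :=
  if n % f = 0 then
    -- li = [num[i*factor:(i+1)*factor] for i in range(int(len(num)/factor))]
    let li : List (List Char) :=
      (List.range (n / f)).map (fun (i : Nat) =>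
        PySem.List.slice s (some ((i : Int) * (f : Int))) (some (((i : Int) + 1) * (f : Int))))
    if li.length = 1 then false  -- continue
    else
      -- flag = True; for i in range(len(li)): if li[0] != li[i]: flag = False
      -- (li[0] as getD 0 []: li is nonempty whenever this line is reached)
      (List.range li.length).foldl
        (fun flag i => if li.getD 0 [] ≠ li.getD i [] then false else flag) true
  else false

def check (num : String) : Bool :=
  let s := num.toList
  let n := s.length
  -- for factor in range(1, math.floor(len(num)/2)): ... if flag: return True
  (List.range' 1 (n / 2 - 1)).any (fun f => checkInner s n f)

-- ===== PORT B =====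
def check_alt (num : String) : Bool :=
  let s := num.toList
  let n := s.length
  -- best = 0; for l in range(1, n): if num[:l] == num[n-l:]: best = l
  -- (the slices num[:l] and num[n-l:] are exact as take/drop for 0 ≤ l ≤ n)
  let best := (List.range' 1 (n - 1)).foldl
    (fun best l => if s.take l = s.drop (n - l) then l else best) 0
  -- p = n - best; return n >= 3 and n % p == 0 and n // p >= 3
  let p := n - best
  decide (3 ≤ n) && (n % p == 0) && decide (3 ≤ n / p)

-- ===== PRECONDITION & SPEC =====
-- On 3-character strings of one repeated character (e.g. "aaa") A returns false because its factor
-- loop range(1, floor(n/2)) excludes factor 1 when n = 3; B returns true, the intended value since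
-- such a string is 3 repetitions of one character.
def D_check (num : String) : Prop :=
  num.toList.length = 3 ∧
  num.toList.getD 0 ' ' = num.toList.getD 1 ' ' ∧
  num.toList.getD 1 ' ' = num.toList.getD 2 ' '
instance (num : String) : Decidable (D_check num) := by unfold D_check; infer_instance

def Spec_check (num : String) (out : Bool) : Prop := ¬ D_check num → out = check_alt num
instance (num : String) (out : Bool) : Decidable (Spec_check num out) := by unfold Spec_check; infer_instance

def pvDiffWitness_check : String := "aaa"
def pvDiffWitnessOut_check : Bool × Bool := (false, true)

-- ===== CLAIM (what is proved, stated in full; the proofs are below) =====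
def Claim_unchanged_check : Prop := ∀ (num : String), Dom_check num → Spec_check num (check num)
def Claim_changed_check : Prop := Dom_check (pvDiffWitness_check) ∧ D_check (pvDiffWitness_check) ∧ check (pvDiffWitness_check) = pvDiffWitnessOut_check.1 ∧ check_alt (pvDiffWitness_check) = pvDiffWitnessOut_check.2 ∧ pvDiffWitnessOut_check.1 ≠ pvDiffWitnessOut_check.2
def Claim_exact_check : Prop := ∀ (num : String), Dom_check num → D_check num → check num ≠ check_alt num

-- ===== LEMMAS AND PROOFS =====

-- ---- A-side characterisation (chunk form) ----

theorem foldl_flag {α : Type} (p : α → Prop) [DecidablePred p] :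
    ∀ (L : List α) (b : Bool),
      L.foldl (fun flag i => if p i then false else flag) b
        = (b && L.all (fun i => !decide (p i))) := by
  intro L
  induction L with
  | nil => intro b; simp
  | cons x L ih =>
      intro b
      simp only [List.foldl_cons, List.all_cons, ih]
      by_cases h : p x <;> simp [h]

theorem inner_iff (s : List Char) (n f : Nat) :
    checkInner s n f = true ↔
      n % f = 0 ∧ n / f ≠ 1 ∧ ∀ i < n / f, (s.drop (i * f)).take f = s.take f := by
  unfold checkInner
  by_cases hm : n % f = 0
  · rw [if_pos hm]
    have hmap : (List.range (n / f)).map (fun (i : Nat) =>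
          PySem.List.slice s (some ((i : Int) * (f : Int))) (some (((i : Int) + 1) * (f : Int))))
        = (List.range (n / f)).map (fun i => (s.drop (i * f)).take f) := by
      refine List.map_congr_left (fun i _ => ?_)
      have h1 : ((i : Int) * (f : Int)) = ((i * f : Nat) : Int) := by push_cast; ring
      have h2 : (((i : Int) + 1) * (f : Int)) = ((i * f : Nat) : Int) + ((f : Nat) : Int) := by
        push_cast; ring
      rw [h1, h2, PySem.List.slice_natCast_add]
    simp only [hmap, List.length_map, List.length_range]
    have hget : ∀ i, i < n / f →
        ((List.range (n / f)).map (fun i => (s.drop (i * f)).take f)).getD i [] =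
          (s.drop (i * f)).take f := by
      intro i hi
      rw [List.getD_eq_getElem?_getD]
      simp [hi]
    by_cases h1 : n / f = 1
    · simp [h1]
    · rw [if_neg h1,
        foldl_flag (fun i => ((List.range (n / f)).map (fun i => (s.drop (i * f)).take f)).getD 0 []
            ≠ ((List.range (n / f)).map (fun i => (s.drop (i * f)).take f)).getD i [])]
      simp only [Bool.true_and, List.all_eq_true, List.mem_range, Bool.not_eq_true',
        decide_eq_false_iff_not, ne_eq, not_not]
      constructor
      · intro h
        refine ⟨hm, h1, fun i hi => ?_⟩
        have h0 : (0 : Nat) < n / f := Nat.zero_lt_of_lt hi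
        have := h i hi
        rw [hget 0 h0, hget i hi] at this
        simp only [Nat.zero_mul, List.drop_zero] at this
        exact this.symm
      · rintro ⟨-, -, h⟩ i hi
        have h0 : (0 : Nat) < n / f := Nat.zero_lt_of_lt hi
        rw [hget 0 h0, hget i hi]
        simp only [Nat.zero_mul, List.drop_zero]
        exact (h i hi).symm
  · simp [hm]

theorem check_iff (num : String) :
    check num = true ↔
      ∃ f, 1 ≤ f ∧ f < num.toList.length / 2 ∧
        checkInner num.toList num.toList.length f = true := by
  unfold check
  simp only [List.any_eq_true, List.mem_range'_1]
  constructor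
  · rintro ⟨f, ⟨h1, h2⟩, h3⟩
    exact ⟨f, h1, by omega, h3⟩
  · rintro ⟨f, h1, h2, h3⟩
    exact ⟨f, ⟨h1, by omega⟩, h3⟩

-- ---- periods and borders ----

def HasPeriod (s : List Char) (p : Nat) : Prop :=
  ∀ i, i + p < s.length → s[i + p]? = s[i]?

theorem period_iff (s : List Char) (p : Nat) (hp : p ≤ s.length) :
    s.take (s.length - p) = s.drop p ↔ HasPeriod s p := by
  constructor
  · intro h i hi
    have h' := congrArg (fun l => l[i]?) h
    simp only [List.getElem?_drop] at h'
    rw [List.getElem?_take_of_lt (by omega)] at h'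
    rw [Nat.add_comm p i] at h'
    exact h'.symm
  · intro h
    apply List.ext_getElem?
    intro i
    rw [List.getElem?_drop]
    by_cases hi : i < s.length - p
    · rw [List.getElem?_take_of_lt hi]
      have := h i (by omega)
      rw [Nat.add_comm i p] at this
      exact this.symm
    · rw [List.getElem?_take_eq_none (by omega), List.getElem?_eq_none (by omega)]

theorem period_iterate (s : List Char) (p : Nat) (h : HasPeriod s p) :
    ∀ t i, i + t * p < s.length → s[i + t * p]? = s[i]? := by
  intro t
  induction t with
  | zero => intro i _; simp
  | succ t ih =>
      intro i hi
      have e : i + (t + 1) * p = (i + t * p) + p := by ring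
      rw [e, h (i + t * p) (by omega), ih i (by omega)]

theorem blocks_iff_period (s : List Char) (f k : Nat) (hf : 0 < f)
    (hn : s.length = k * f) :
    (∀ i < k, (s.drop (i * f)).take f = s.take f) ↔ HasPeriod s f := by
  constructor
  · intro hblk i hi
    set t := i / f with ht
    set r := i % f with hr
    have hrf : r < f := Nat.mod_lt _ hf
    have he : f * t + r = i := Nat.div_add_mod i f
    have htk : t + 1 < k := by
      by_contra hc
      have h1 : k ≤ t + 1 := by omega
      have h2 : k * f ≤ (t + 1) * f := Nat.mul_le_mul_right f h1
      have h3 : (t + 1) * f = f * t + f := by ring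
      omega
    have get_blk : ∀ u, u < k → s[u * f + r]? = s[r]? := by
      intro u hu
      have hb := hblk u hu
      have h' := congrArg (fun l => l[r]?) hb
      simp only [List.getElem?_take_of_lt hrf, List.getElem?_drop] at h'
      exact h'
    have e1 : i + f = (t + 1) * f + r := by rw [← he]; ring
    have e2 : i = t * f + r := by rw [← he]; ring
    rw [e1, get_blk (t + 1) htk, e2, get_blk t (by omega)]
  · intro hp i hik
    apply List.ext_getElem?
    intro j
    by_cases hj : j < f
    · rw [List.getElem?_take_of_lt hj, List.getElem?_take_of_lt hj, List.getElem?_drop]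
      have hlt : j + i * f < s.length := by
        have h1 : i * f + j < (i + 1) * f := by
          have : i * f + j < i * f + f := by omega
          calc i * f + j < i * f + f := this
            _ = (i + 1) * f := by ring
        have h2 : (i + 1) * f ≤ k * f := Nat.mul_le_mul_right f (by omega)
        omega
      have := period_iterate s f hp i j hlt
      rw [Nat.add_comm (i * f) j, this]
    · rw [List.getElem?_take_eq_none (by omega), List.getElem?_take_eq_none (by omega)]

-- weak Fine–Wilf: two periods whose sum fits in the string have their difference,
-- hence their gcd, as a period
theorem period_sub (s : List Char) (p q : Nat) (hpq : p < q)
    (hn : p + q ≤ s.length) (hp : HasPeriod s p) (hq : HasPeriod s q) :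
    HasPeriod s (q - p) := by
  intro i hi
  by_cases h : p ≤ i
  · have h1 := hq (i - p) (by omega)
    have h2 := hp (i - p) (by omega)
    have e1 : i + (q - p) = (i - p) + q := by omega
    have e2 : (i - p) + p = i := by omega
    rw [e1, h1, ← h2, e2]
  · have h1 := hp (i + (q - p)) (by omega)
    have h2 := hq i (by omega)
    have e : i + (q - p) + p = i + q := by omega
    rw [← h1, e, h2]

theorem period_gcd (s : List Char) :
    ∀ (m p q : Nat), p + q ≤ m → 0 < p → 0 < q → p + q ≤ s.length →
      HasPeriod s p → HasPeriod s q → HasPeriod s (Nat.gcd p q) := by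
  intro m
  induction m with
  | zero => intro p q hm hp hq _ _ _; omega
  | succ m ih =>
      intro p q hm hp0 hq0 hn hp hq
      rcases Nat.lt_trichotomy p q with hlt | heq | hgt
      · have hsub := period_sub s p q hlt hn hp hq
        have : HasPeriod s (Nat.gcd p (q - p)) :=
          ih p (q - p) (by omega) hp0 (by omega) (by omega) hp hsub
        rwa [Nat.gcd_sub_self_right (le_of_lt hlt)] at this
      · subst heq; rwa [Nat.gcd_self]
      · have hsub := period_sub s q p hgt (by omega) hq hp
        have : HasPeriod s (Nat.gcd q (p - q)) :=
          ih q (p - q) (by omega) hq0 (by omega) (by omega) hq hsub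
        rwa [Nat.gcd_sub_self_right (le_of_lt hgt), Nat.gcd_comm] at this

-- ---- B-side: the fold keeps the last (= largest) index satisfying the test ----

theorem foldl_best (Q : Nat → Prop) [DecidablePred Q] :
    ∀ (m : Nat),
      ((List.range' 1 m).foldl (fun acc l => if Q l then l else acc) 0) ≤ m ∧
      (((List.range' 1 m).foldl (fun acc l => if Q l then l else acc) 0) = 0 ∨
        (1 ≤ ((List.range' 1 m).foldl (fun acc l => if Q l then l else acc) 0) ∧
          Q ((List.range' 1 m).foldl (fun acc l => if Q l then l else acc) 0))) ∧
      (∀ l, ((List.range' 1 m).foldl (fun acc l => if Q l then l else acc) 0) < l →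
        l ≤ m → ¬ Q l) := by
  intro m
  induction m with
  | zero => exact ⟨Nat.le_refl 0, Or.inl rfl, fun l h1 h2 => by omega⟩
  | succ m ih =>
      obtain ⟨ih1, ih2, ih3⟩ := ih
      have hcat : List.range' 1 (m + 1) = List.range' 1 m ++ [1 + m] := List.range'_1_concat
      rw [hcat, List.foldl_append]
      simp only [List.foldl_cons, List.foldl_nil]
      by_cases hQ : Q (1 + m)
      · rw [if_pos hQ]
        refine ⟨by omega, Or.inr ⟨by omega, hQ⟩, fun l h1 h2 => by omega⟩
      · rw [if_neg hQ]
        refine ⟨by omega, ih2, fun l h1 h2 => ?_⟩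
        rcases Nat.lt_or_ge l (m + 1) with h | h
        · exact ih3 l h1 (by omega)
        · have : l = 1 + m := by omega
          rw [this]; exact hQ

-- ---- the two characterisations and the main equivalence ----

theorem alt_iff (num : String) :
    check_alt num = true ↔
      ∃ p, 0 < p ∧ p ∣ num.toList.length ∧ 3 ≤ num.toList.length / p ∧
        HasPeriod num.toList p := by
  unfold check_alt
  set s := num.toList with hs
  set n := s.length with hn
  set best := (List.range' 1 (n - 1)).foldl
    (fun best l => if s.take l = s.drop (n - l) then l else best) 0 with hbest
  obtain ⟨hb1, hb2, hb3⟩ := foldl_best (fun l => s.take l = s.drop (n - l)) (n - 1)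
  rw [← hbest] at hb1 hb2 hb3
  simp only [Bool.and_eq_true, decide_eq_true_eq, beq_iff_eq]
  constructor
  · rintro ⟨⟨h3n, hmod⟩, hdiv3⟩
    have hp0 : 0 < n - best := by omega
    refine ⟨n - best, hp0, Nat.dvd_of_mod_eq_zero hmod, hdiv3, ?_⟩
    rcases hb2 with h0 | ⟨h1, hQ⟩
    · rw [h0]
      simp only [Nat.sub_zero]
      intro i hi; omega
    · have : n - (n - best) = best := by omega
      rw [← period_iff s (n - best) (by omega), this]
      exact hQ
  · rintro ⟨p, hp0, hdvd, h3, hper⟩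
    have hn3p : 3 * p ≤ n := by
      have := Nat.div_mul_cancel hdvd
      have h1 : 3 * p ≤ (n / p) * p := Nat.mul_le_mul_right p h3
      omega
    have hpn : p < n := by omega
    -- l := n - p is a border index the fold has seen, so best ≥ n - p, i.e. n - best ≤ p
    have hQl : s.take (n - p) = s.drop (n - (n - p)) := by
      have e : n - (n - p) = p := by omega
      rw [e]
      exact (period_iff s p (by omega)).mpr hper
    have hble : n - p ≤ best := by
      by_contra hc
      exact hb3 (n - p) (by omega) (by omega) hQl
    have hp0' : 0 < n - best := by omega
    have hple : n - best ≤ p := by omega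
    -- n - best is itself a period
    have hper0 : HasPeriod s (n - best) := by
      rcases hb2 with h0 | ⟨h1, hQ⟩
      · rw [h0]; simp only [Nat.sub_zero]; intro i hi; omega
      · have e : n - (n - best) = best := by omega
        rw [← period_iff s (n - best) (by omega), e]
        exact hQ
    -- Fine–Wilf: gcd (n - best) p is a period; maximality of best forces gcd = n - best
    have hg : HasPeriod s (Nat.gcd (n - best) p) :=
      period_gcd s ((n - best) + p) (n - best) p (Nat.le_refl _) hp0' hp0 (by omega) hper0 hper
    have hg0 : 0 < Nat.gcd (n - best) p := Nat.gcd_pos_of_pos_left p hp0'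
    have hgle : Nat.gcd (n - best) p ≤ n - best :=
      Nat.le_of_dvd hp0' (Nat.gcd_dvd_left _ _)
    have hgeq : Nat.gcd (n - best) p = n - best := by
      by_contra hne
      have hglt : Nat.gcd (n - best) p < n - best := by omega
      set g := Nat.gcd (n - best) p with hgname
      have hQg : s.take (n - g) = s.drop (n - (n - g)) := by
        have e : n - (n - g) = g := by omega
        rw [e]
        exact (period_iff s g (by omega)).mpr hg
      exact hb3 (n - g) (by omega) (by omega) hQg
    have hdvdp : (n - best) ∣ p := hgeq ▸ Nat.gcd_dvd_right (n - best) p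
    have hdvdn : (n - best) ∣ n := dvd_trans hdvdp hdvd
    have hdivle : n / p ≤ n / (n - best) := Nat.div_le_div_left hple hp0'
    exact ⟨⟨by omega, Nat.mod_eq_zero_of_dvd hdvdn⟩, le_trans h3 hdivle⟩

theorem D_elim (num : String) (hD : D_check num) :
    ∃ a : Char, num.toList = [a, a, a] := by
  obtain ⟨h1, h2, h3⟩ := hD
  rcases List.length_eq_three.mp h1 with ⟨a, b, c, hs⟩
  rw [hs] at h2 h3
  simp [List.getD] at h2 h3
  exact ⟨c, by rw [hs, h2, h3]⟩

theorem A_iff (num : String) (hD : ¬ D_check num) :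
    check num = true ↔
      ∃ p, 0 < p ∧ p ∣ num.toList.length ∧ 3 ≤ num.toList.length / p ∧
        HasPeriod num.toList p := by
  rw [check_iff]
  set s := num.toList with hs
  set n := s.length with hn
  constructor
  · rintro ⟨f, hf1, hf2, hinner⟩
    obtain ⟨hmod, hne1, hblk⟩ := (inner_iff s n f).mp hinner
    have hdvd : f ∣ n := Nat.dvd_of_mod_eq_zero hmod
    have hmul : (n / f) * f = n := Nat.div_mul_cancel hdvd
    have h2f : 2 * f + 2 ≤ n := by omega
    have h3 : 3 ≤ n / f := by
      by_contra hc
      have hle : n / f ≤ 2 := by omega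
      have : (n / f) * f ≤ 2 * f := Nat.mul_le_mul_right f hle
      omega
    refine ⟨f, hf1, hdvd, h3, ?_⟩
    exact (blocks_iff_period s f (n / f) hf1 (by omega)).mp hblk
  · rintro ⟨p, hp0, hdvd, h3, hper⟩
    have hmul : (n / p) * p = n := Nat.div_mul_cancel hdvd
    have hn3p : 3 * p ≤ n := by
      have h1 : 3 * p ≤ (n / p) * p := Nat.mul_le_mul_right p h3
      omega
    have hblk : ∀ i < n / p, (s.drop (i * p)).take p = s.take p :=
      (blocks_iff_period s p (n / p) hp0 (by omega)).mpr hper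
    have hf2 : p < n / 2 := by
      rcases Nat.lt_or_ge p 2 with h1 | h2
      · -- p = 1
        have hp1 : p = 1 := by omega
        rcases Nat.lt_or_ge n 4 with h4 | h4
        · -- n = 3 and period 1: the string is one repeated character, i.e. D_check
          exfalso
          have hne3 : n = 3 := by omega
          apply hD
          have e1 : s[0 + 1]? = s[0]? := by
            have := hper 0 (by omega); rwa [hp1] at this
          have e2 : s[1 + 1]? = s[1]? := by
            have := hper 1 (by omega); rwa [hp1] at this
          refine ⟨by omega, ?_, ?_⟩
          · rw [List.getD_eq_getElem?_getD, List.getD_eq_getElem?_getD, ← e1]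
          · rw [List.getD_eq_getElem?_getD, List.getD_eq_getElem?_getD, ← e2]
        · -- n ≥ 4 and p = 1: 1 < n / 2
          have : 2 ≤ n / 2 := by omega
          omega
      · -- p ≥ 2: 3p ≤ n gives 2p + 2 ≤ n, hence p < n / 2
        have h2p : 2 * p + 2 ≤ n := by omega
        omega
    refine ⟨p, hp0, hf2, ?_⟩
    exact (inner_iff s n p).mpr ⟨Nat.mod_eq_zero_of_dvd hdvd, by omega, hblk⟩

theorem check_spec' : ∀ (num : String), ¬ D_check num → check num = check_alt num := by
  intro num hD
  have h := (A_iff num hD).trans (alt_iff num).symm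
  cases hA : check num <;> cases hB : check_alt num <;> simp_all

theorem check_tight' : ∀ (num : String), D_check num → check num ≠ check_alt num := by
  intro num hD
  obtain ⟨a, hs⟩ := D_elim num hD
  have hA : check num = false := by
    simp [check, hs]
  have hB : check_alt num = true := by
    simp [check_alt, hs, List.range']
  rw [hA, hB]
  simp

-- ===== VERDICT (by name: the statement is the Claim_ definition above) =====
theorem check_spec : Claim_unchanged_check := by
  intro num _
  unfold Spec_check
  intro hD
  exact check_spec' num hD

theorem check_changed : Claim_changed_check := by unfold Claim_changed_check; decide

theorem check_tight : Claim_exact_check := by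
  intro num _ hD
  exact check_tight' num hD
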